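-- pv_equiv track=rewrite | github.com/alunfes/kg-discovery-engine | crypto/src/eval/confusion_matrix.py | build_branch_reroute_matrix
-- ===== SOURCE A (Python) =====
-- def _increment(matrix: dict[str, dict[str, int]], row: str, col: str) -> None:
--     """Increment matrix[row][col] by 1.
--
--     Why two-step: Python evaluates the RHS before the LHS target is resolved,
--     so a one-liner like `matrix.setdefault(row, {})[col] = matrix[row].get(...)`
--     would raise KeyError because matrix[row] is accessed on the RHS before
--     setdefault has a chance to insert the key.
--     """
--     matrix.setdefault(row, {})
--     matrix[row][col] = matrix[row].get(col, 0) + 1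
--
-- def build_branch_reroute_matrix(
--     reroute_candidates: list[dict],
-- ) -> dict[str, dict[str, int]]:
--     """Matrix: original_branch → rerouted_branch → count.
--
--     Each reroute record contributes one cell to the matrix.
--     Confidence-weighted is NOT used here; the matrix shows raw frequency so
--     that rare but high-confidence reroutes are not inflated.
--     """
--     matrix: dict[str, dict[str, int]] = {}
--     for r in reroute_candidates:
--         orig = r.get("original_branch", "unknown")
--         dest = r.get("reroute_candidate_branch", "unknown")
--         _increment(matrix, orig, dest)
--     return matrix
-- ===== SOURCE B (Python) =====
-- def build_branch_reroute_matrix(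
--     reroute_candidates: list[dict],
-- ) -> dict[str, dict[str, int]]:
--     """Flat (orig, dest) count table built in one pass, then reshaped into
--     the nested orig -> dest -> count dict."""
--     pairs = [
--         (r.get("original_branch", "unknown"), r.get("reroute_candidate_branch", "unknown"))
--         for r in reroute_candidates
--     ]
--     counts: dict[tuple[str, str], int] = {}
--     for p in pairs:
--         counts[p] = counts.get(p, 0) + 1
--     matrix: dict[str, dict[str, int]] = {}
--     for (orig, dest), n in counts.items():
--         matrix.setdefault(orig, {})[dest] = n
--     return matrix
-- ===== Notes on version B (the rewrite author's own statement) =====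
-- stated objective: alternative
-- what changed: Replaces the nested-dict increment-per-record loop with a flat dict keyed on the (orig, dest) tuple counted in one pass, then a separate reshaping pass that assigns each final count into the nested matrix via setdefault.
import Mathlib
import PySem

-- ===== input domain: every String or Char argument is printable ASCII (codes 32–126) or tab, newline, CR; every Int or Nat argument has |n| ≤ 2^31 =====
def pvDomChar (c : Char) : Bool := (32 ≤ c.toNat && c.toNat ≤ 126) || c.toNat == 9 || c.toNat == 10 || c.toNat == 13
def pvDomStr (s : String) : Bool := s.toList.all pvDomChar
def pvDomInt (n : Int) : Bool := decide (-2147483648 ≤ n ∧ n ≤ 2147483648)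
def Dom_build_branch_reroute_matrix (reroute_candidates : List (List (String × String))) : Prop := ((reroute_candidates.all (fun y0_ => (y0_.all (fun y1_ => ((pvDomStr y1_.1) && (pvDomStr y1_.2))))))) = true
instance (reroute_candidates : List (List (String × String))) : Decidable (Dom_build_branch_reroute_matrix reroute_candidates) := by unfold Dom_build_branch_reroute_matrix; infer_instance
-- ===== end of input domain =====

-- B replaces A's per-record nested increment with a flat (orig, dest)-tuple count dict built in
-- one pass plus a reshaping pass that assigns each final count (objective: alternative; same cost).

-- shared helper: r.get(key, "unknown") on a dict ported as an association list (first-match lookup)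
def pvGet (r : List (String × String)) (k : String) : String :=
  (PySem.Dict.mk r).getD k "unknown"

-- ===== PORT A =====
-- _increment: matrix.setdefault(row, {}); matrix[row][col] = matrix[row].get(col, 0) + 1
-- (matrix[row] is ported with getD: the setdefault on the previous line guarantees the key exists)
def pvInc (matrix : PySem.Dict String (PySem.Dict String Int)) (row col : String) :
    PySem.Dict String (PySem.Dict String Int) :=
  let m1 := matrix.setdefault row PySem.Dict.empty
  let inner := m1.getD row PySem.Dict.empty
  m1.insert row (inner.insert col (inner.getD col 0 + 1))

def build_branch_reroute_matrix (reroute_candidates : List (List (String × String))) :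
    List (String × List (String × Int)) :=
  (reroute_candidates.foldl
      (fun matrix r => pvInc matrix (pvGet r "original_branch") (pvGet r "reroute_candidate_branch"))
      PySem.Dict.empty).items.map (fun p => (p.1, p.2.items))

-- ===== PORT B =====
-- pairs list; counts[p] = counts.get(p, 0) + 1; then matrix.setdefault(orig, {})[dest] = n
-- (setdefault returning the inner dict and mutating it = re-inserting the extended inner dict)
def build_branch_reroute_matrix_alt (reroute_candidates : List (List (String × String))) :
    List (String × List (String × Int)) :=
  let pairs := reroute_candidates.map
      (fun r => (pvGet r "original_branch", pvGet r "reroute_candidate_branch"))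
  let counts := pairs.foldl (fun d p => d.insert p (d.getD p 0 + 1))
      (PySem.Dict.empty : PySem.Dict (String × String) Int)
  let matrix := counts.items.foldl
      (fun m q =>
        let m1 := m.setdefault q.1.1 PySem.Dict.empty
        m1.insert q.1.1 ((m1.getD q.1.1 PySem.Dict.empty).insert q.1.2 q.2))
      (PySem.Dict.empty : PySem.Dict String (PySem.Dict String Int))
  matrix.items.map (fun p => (p.1, p.2.items))

-- ===== PRECONDITION & SPEC =====
def Spec_build_branch_reroute_matrix (reroute_candidates : List (List (String × String))) (out : List (String × List (String × Int))) : Prop := out = build_branch_reroute_matrix_alt reroute_candidates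
instance (reroute_candidates : List (List (String × String))) (out : List (String × List (String × Int))) : Decidable (Spec_build_branch_reroute_matrix reroute_candidates out) := by unfold Spec_build_branch_reroute_matrix; infer_instance

-- ===== CLAIM (what is proved, stated in full; the proofs are below) =====
def Claim_equal_build_branch_reroute_matrix : Prop := ∀ (reroute_candidates : List (List (String × String))), Dom_build_branch_reroute_matrix reroute_candidates → Spec_build_branch_reroute_matrix reroute_candidates (build_branch_reroute_matrix reroute_candidates)

-- ===== LEMMAS AND PROOFS =====

-- closed-form value of A's matrix after processing the pair list P
def pvInner (P : List (String × String)) (o : String) : List (String × Int) :=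
  (PySem.Set.ofList ((P.filter (fun q => q.1 == o)).map Prod.snd)).map
    (fun t => (t, (P.count (o, t) : Int)))

def pvSpecDict (P : List (String × String)) : PySem.Dict String (PySem.Dict String Int) :=
  PySem.Dict.mk ((PySem.Set.ofList (P.map Prod.fst)).map
    (fun o => (o, PySem.Dict.mk (pvInner P o))))

-- closed-form value of B's reshape loop over an item list Q with distinct keys
def pvRow (Q : List ((String × String) × Int)) (o : String) : List (String × Int) :=
  (Q.filter (fun q => q.1.1 == o)).map (fun q => (q.1.2, q.2))

def pvLikeDict (Q : List ((String × String) × Int)) : PySem.Dict String (PySem.Dict String Int) :=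
  PySem.Dict.mk ((PySem.Set.ofList (Q.map (fun q => q.1.1))).map
    (fun o => (o, PySem.Dict.mk (pvRow Q o))))

theorem pvSet_ofList_map {α β : Type} [BEq α] [LawfulBEq α] [BEq β] [LawfulBEq β] (l : List α) (f : α → β) :
    PySem.Set.ofList ((PySem.Set.ofList l).map f) = PySem.Set.ofList (l.map f) := by
  induction l using List.reverseRecOn with
  | nil => rfl
  | append_singleton l x ih =>
    rw [PySem.Set.ofList_append_singleton]
    by_cases hx : x ∈ PySem.Set.ofList l
    · rw [PySem.Set.add_of_mem hx, ih, List.map_append, List.map_singleton,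
        PySem.Set.ofList_append_singleton, PySem.Set.add_of_mem]
      exact (PySem.Set.mem_ofList _ _).mpr (List.mem_map_of_mem ((PySem.Set.mem_ofList _ _).mp hx))
    · rw [PySem.Set.add_of_not_mem hx, List.map_append, List.map_singleton,
        PySem.Set.ofList_append_singleton, ih, List.map_append, List.map_singleton,
        PySem.Set.ofList_append_singleton]

theorem pvSet_filter_ofList {α : Type} [BEq α] [LawfulBEq α] (l : List α) (p : α → Bool) :
    (PySem.Set.ofList l).filter p = PySem.Set.ofList (l.filter p) := by
  induction l using List.reverseRecOn with
  | nil => rfl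
  | append_singleton l x ih =>
    rw [PySem.Set.ofList_append_singleton, List.filter_append]
    by_cases hx : x ∈ PySem.Set.ofList l
    · rw [PySem.Set.add_of_mem hx, ih]
      by_cases hp : p x = true
      · have hxf : x ∈ l.filter p := List.mem_filter.mpr ⟨(PySem.Set.mem_ofList _ _).mp hx, hp⟩
        simp [hp, PySem.Set.ofList_append_singleton, PySem.Set.add_of_mem ((PySem.Set.mem_ofList _ _).mpr hxf)]
      · simp [hp]
    · rw [PySem.Set.add_of_not_mem hx, List.filter_append, ih]
      by_cases hp : p x = true
      · have hxf : x ∉ l.filter p := fun h => hx ((PySem.Set.mem_ofList _ _).mpr (List.mem_filter.mp h).1)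
        simp [hp, PySem.Set.ofList_append_singleton, PySem.Set.add_of_not_mem
          (fun h => hxf ((PySem.Set.mem_ofList _ _).mp h))]
      · simp [hp]

theorem pvSet_map_ofList_inj {α β : Type} [BEq α] [LawfulBEq α] [BEq β] [LawfulBEq β] (l : List α) (f : α → β)
    (h : ∀ a ∈ l, ∀ b ∈ l, f a = f b → a = b) :
    (PySem.Set.ofList l).map f = PySem.Set.ofList (l.map f) := by
  induction l using List.reverseRecOn with
  | nil => rfl
  | append_singleton l x ih =>
    have h' : ∀ a ∈ l, ∀ b ∈ l, f a = f b → a = b := fun a ha b hb =>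
      h a (List.mem_append_left _ ha) b (List.mem_append_left _ hb)
    rw [PySem.Set.ofList_append_singleton, List.map_append, List.map_singleton,
      PySem.Set.ofList_append_singleton, ← ih h']
    by_cases hx : x ∈ PySem.Set.ofList l
    · rw [PySem.Set.add_of_mem hx, PySem.Set.add_of_mem]
      exact List.mem_map_of_mem hx
    · rw [PySem.Set.add_of_not_mem hx, List.map_append, List.map_singleton, PySem.Set.add_of_not_mem]
      intro hf
      rcases List.mem_map.mp hf with ⟨a, ha, hfa⟩
      have : a = x := h a (List.mem_append_left _ ((PySem.Set.mem_ofList _ _).mp ha))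
        x (List.mem_append_right _ (List.mem_singleton_self x)) hfa
      exact hx (this ▸ ha)

theorem pvInner_append_ne (P : List (String × String)) (o t o' : String) (h : o' ≠ o) :
    pvInner (P ++ [(o, t)]) o' = pvInner P o' := by
  unfold pvInner
  have h1 : ((o, t).1 == o') = false := by simp [Ne.symm h]
  have hf : (P ++ [(o, t)]).filter (fun q => q.1 == o') = P.filter (fun q => q.1 == o') := by
    rw [List.filter_append]; simp [Ne.symm h]
  rw [hf]
  apply List.map_congr_left
  intro t' _
  have h2 : List.count (o', t') (P ++ [(o, t)]) = List.count (o', t') P := by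
    rw [List.count_append]
    simp [Ne.symm h]
  rw [h2]

theorem pvInner_nodup_keys (P : List (String × String)) (o : String) :
    (PySem.Dict.mk (pvInner P o)).keys.Nodup := by
  rw [PySem.Dict.keys_mk]
  unfold pvInner
  rw [List.map_map]
  simp [Function.comp_def]

theorem pvInnerGetD (P : List (String × String)) (o t : String) :
    (PySem.Dict.mk (pvInner P o)).getD t 0 = (P.count (o, t) : Int) := by
  by_cases ht : t ∈ PySem.Set.ofList ((P.filter (fun q => q.1 == o)).map Prod.snd)
  · have hmem : (t, (List.count (o, t) P : Int)) ∈ pvInner P o := by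
      unfold pvInner; exact List.mem_map.mpr ⟨t, ht, rfl⟩
    exact PySem.Dict.getD_of_mem_items (PySem.Dict.mk (pvInner P o)) hmem (pvInner_nodup_keys P o) 0
  · have hc : (PySem.Dict.mk (pvInner P o)).contains t = false := by
      rw [PySem.Dict.contains_eq_decide_mem_keys, decide_eq_false_iff_not]
      rw [PySem.Dict.keys_mk]
      unfold pvInner
      rw [List.map_map]
      simpa using ht
    rw [PySem.Dict.getD_of_not_contains _ _ hc]
    have : List.count (o, t) P = 0 := by
      rw [List.count_eq_zero]
      intro hmem
      exact ht ((PySem.Set.mem_ofList _ _).mpr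
        (List.mem_map.mpr ⟨(o, t), List.mem_filter.mpr ⟨hmem, by simp⟩, rfl⟩))
    rw [this]; rfl

theorem pvInnerInsert (P : List (String × String)) (o t : String) :
    (PySem.Dict.mk (pvInner P o)).insert t ((P.count (o, t) : Int) + 1) =
      PySem.Dict.mk (pvInner (P ++ [(o, t)]) o) := by
  apply PySem.Dict.ext
  have hfilter : (P ++ [(o, t)]).filter (fun q => q.1 == o) =
      P.filter (fun q => q.1 == o) ++ [(o, t)] := by
    rw [List.filter_append]; simp
  have hcnt_self : (List.count (o, t) (P ++ [(o, t)]) : Int) = (List.count (o, t) P : Int) + 1 := by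
    rw [List.count_append]; simp
  have hcnt_ne : ∀ t' : String, t' ≠ t →
      List.count (o, t') (P ++ [(o, t)]) = List.count (o, t') P := by
    intro t' hne
    rw [List.count_append]; simp [Ne.symm hne]
  by_cases ht : t ∈ PySem.Set.ofList ((P.filter (fun q => q.1 == o)).map Prod.snd)
  · have hc : (PySem.Dict.mk (pvInner P o)).contains t = true := by
      rw [PySem.Dict.contains_eq_decide_mem_keys, decide_eq_true_iff, PySem.Dict.keys_mk]
      unfold pvInner
      rw [List.map_map]
      simpa using ht
    rw [PySem.Dict.items_insert_of_contains _ _ hc]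
    show List.map _ (pvInner P o) = pvInner (P ++ [(o, t)]) o
    unfold pvInner
    rw [hfilter, List.map_append]
    simp only [List.map_singleton]
    rw [PySem.Set.ofList_append_singleton, PySem.Set.add_of_mem ht, List.map_map]
    apply List.map_congr_left
    intro t' _
    by_cases hne : t' = t
    · subst hne; simp
    · simp [hne, hcnt_ne t' hne]
  · have hc : (PySem.Dict.mk (pvInner P o)).contains t = false := by
      rw [PySem.Dict.contains_eq_decide_mem_keys, decide_eq_false_iff_not, PySem.Dict.keys_mk]
      unfold pvInner
      rw [List.map_map]
      simpa using ht
    rw [PySem.Dict.items_insert_of_not_contains _ _ hc]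
    show pvInner P o ++ _ = pvInner (P ++ [(o, t)]) o
    unfold pvInner
    rw [hfilter, List.map_append]
    simp only [List.map_singleton]
    rw [PySem.Set.ofList_append_singleton, PySem.Set.add_of_not_mem ht, List.map_append]
    congr 1
    · apply List.map_congr_left
      intro t' ht'
      have hne : t' ≠ t := fun h => ht (h ▸ ht')
      simp [hcnt_ne t' hne]
    · simp

theorem pvSpec_nodup_keys (P : List (String × String)) : (pvSpecDict P).keys.Nodup := by
  unfold pvSpecDict
  rw [PySem.Dict.keys_mk, List.map_map]
  simp [Function.comp_def]

theorem pvSpec_contains (P : List (String × String)) (o : String) :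
    (pvSpecDict P).contains o = decide (o ∈ PySem.Set.ofList (P.map Prod.fst)) := by
  rw [PySem.Dict.contains_eq_decide_mem_keys]
  unfold pvSpecDict
  rw [PySem.Dict.keys_mk, List.map_map]
  simp [Function.comp_def]

theorem pvSpec_getD (P : List (String × String)) (o : String)
    (ho : o ∈ PySem.Set.ofList (P.map Prod.fst)) :
    (pvSpecDict P).getD o PySem.Dict.empty = PySem.Dict.mk (pvInner P o) := by
  have hmem : (o, PySem.Dict.mk (pvInner P o)) ∈ (pvSpecDict P).items := by
    unfold pvSpecDict
    exact List.mem_map.mpr ⟨o, ho, rfl⟩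
  exact PySem.Dict.getD_of_mem_items (pvSpecDict P) hmem (pvSpec_nodup_keys P) _

theorem pvInc_spec (P : List (String × String)) (o t : String) :
    pvInc (pvSpecDict P) o t = pvSpecDict (P ++ [(o, t)]) := by
  have hS' : PySem.Set.ofList ((P ++ [(o, t)]).map Prod.fst) =
      (PySem.Set.ofList (P.map Prod.fst)).add o := by
    rw [List.map_append, List.map_singleton, PySem.Set.ofList_append_singleton]
  by_cases ho : o ∈ PySem.Set.ofList (P.map Prod.fst)
  · have hc : (pvSpecDict P).contains o = true := by
      rw [pvSpec_contains]; exact decide_eq_true ho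
    show (let m1 := (pvSpecDict P).setdefault o PySem.Dict.empty;
      let inner := m1.getD o PySem.Dict.empty;
      m1.insert o (inner.insert t (inner.getD t 0 + 1))) = _
    rw [PySem.Dict.setdefault_of_contains _ _ hc]
    simp only [pvSpec_getD P o ho, pvInnerGetD, pvInnerInsert]
    apply PySem.Dict.ext
    rw [PySem.Dict.items_insert_of_contains _ _ hc]
    show List.map _ (pvSpecDict P).items = (pvSpecDict (P ++ [(o, t)])).items
    unfold pvSpecDict
    rw [hS', PySem.Set.add_of_mem ho]
    show List.map _ (List.map _ _) = _
    rw [List.map_map]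
    apply List.map_congr_left
    intro o' _
    by_cases hne : o' = o
    · subst hne; simp
    · simp only [Function.comp_apply]
      rw [if_neg (by simpa using hne)]
      rw [pvInner_append_ne P o t o' hne]
  · have hc : (pvSpecDict P).contains o = false := by
      rw [pvSpec_contains]; exact decide_eq_false ho
    show (let m1 := (pvSpecDict P).setdefault o PySem.Dict.empty;
      let inner := m1.getD o PySem.Dict.empty;
      m1.insert o (inner.insert t (inner.getD t 0 + 1))) = _
    rw [PySem.Dict.setdefault_of_not_contains _ _ hc]
    simp only [PySem.Dict.getD_insert_self, PySem.Dict.getD_empty, PySem.Dict.insert_insert_self]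
    apply PySem.Dict.ext
    rw [PySem.Dict.items_insert_of_not_contains _ _ hc]
    show (pvSpecDict P).items ++ _ = (pvSpecDict (P ++ [(o, t)])).items
    unfold pvSpecDict
    rw [hS', PySem.Set.add_of_not_mem ho, List.map_append, List.map_singleton]
    congr 1
    · apply List.map_congr_left
      intro o' ho'
      have hne : o' ≠ o := fun h => ho (h ▸ ho')
      rw [pvInner_append_ne P o t o' hne]
    · have hfe : P.filter (fun q => q.1 == o) = [] := by
        rw [List.filter_eq_nil_iff]
        intro q hq hbeq
        exact ho ((PySem.Set.mem_ofList _ _).mpr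
          (List.mem_map.mpr ⟨q, hq, by simpa using hbeq⟩))
      have hcn : List.count (o, t) P = 0 := by
        rw [List.count_eq_zero]
        intro hmem
        have : (o, t) ∈ P.filter (fun q => q.1 == o) := List.mem_filter.mpr ⟨hmem, by simp⟩
        rw [hfe] at this; cases this
      have he : PySem.Dict.empty.insert t ((0 : Int) + 1) =
          PySem.Dict.mk (pvInner (P ++ [(o, t)]) o) := by
        apply PySem.Dict.ext
        rw [PySem.Dict.items_insert_of_not_contains _ _ (by simp)]
        unfold pvInner
        rw [List.filter_append, hfe, List.nil_append]
        simp [hcn, PySem.Set.ofList_cons, List.count_append, PySem.Dict.empty, PySem.Set.discard]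
      rw [he]

theorem pvFoldA (P : List (String × String)) :
    P.foldl (fun m p => pvInc m p.1 p.2) PySem.Dict.empty = pvSpecDict P := by
  induction P using List.reverseRecOn with
  | nil => rfl
  | append_singleton P p ih =>
    rw [List.foldl_append, List.foldl_cons, List.foldl_nil, ih]
    exact pvInc_spec P p.1 p.2

theorem pvRow_append_ne (Q : List ((String × String) × Int)) (o t : String) (c : Int) (o' : String)
    (h : o' ≠ o) : pvRow (Q ++ [((o, t), c)]) o' = pvRow Q o' := by
  unfold pvRow
  have hf : (Q ++ [((o, t), c)]).filter (fun q => q.1.1 == o') = Q.filter (fun q => q.1.1 == o') := by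
    rw [List.filter_append]; simp [Ne.symm h]
  rw [hf]

theorem pvLike_nodup_keys (Q : List ((String × String) × Int)) : (pvLikeDict Q).keys.Nodup := by
  unfold pvLikeDict
  rw [PySem.Dict.keys_mk, List.map_map]
  simp [Function.comp_def]

theorem pvLike_contains (Q : List ((String × String) × Int)) (o : String) :
    (pvLikeDict Q).contains o = decide (o ∈ PySem.Set.ofList (Q.map (fun q => q.1.1))) := by
  rw [PySem.Dict.contains_eq_decide_mem_keys]
  unfold pvLikeDict
  rw [PySem.Dict.keys_mk, List.map_map]
  simp [Function.comp_def]

theorem pvLike_getD (Q : List ((String × String) × Int)) (o : String)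
    (ho : o ∈ PySem.Set.ofList (Q.map (fun q => q.1.1))) :
    (pvLikeDict Q).getD o PySem.Dict.empty = PySem.Dict.mk (pvRow Q o) := by
  have hmem : (o, PySem.Dict.mk (pvRow Q o)) ∈ (pvLikeDict Q).items := by
    unfold pvLikeDict
    exact List.mem_map.mpr ⟨o, ho, rfl⟩
  exact PySem.Dict.getD_of_mem_items (pvLikeDict Q) hmem (pvLike_nodup_keys Q) _

theorem pvStepB (Q : List ((String × String) × Int)) (o t : String) (c : Int)
    (hfresh : (o, t) ∉ Q.map (fun q => q.1)) :
    (let m1 := (pvLikeDict Q).setdefault o PySem.Dict.empty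
     m1.insert o ((m1.getD o PySem.Dict.empty).insert t c)) = pvLikeDict (Q ++ [((o, t), c)]) := by
  have hS' : PySem.Set.ofList ((Q ++ [((o, t), c)]).map (fun q => q.1.1)) =
      (PySem.Set.ofList (Q.map (fun q => q.1.1))).add o := by
    rw [List.map_append, List.map_singleton, PySem.Set.ofList_append_singleton]
  have hrow_self : pvRow Q o ++ [(t, c)] = pvRow (Q ++ [((o, t), c)]) o := by
    unfold pvRow
    rw [List.filter_append, List.map_append]
    simp
  by_cases ho : o ∈ PySem.Set.ofList (Q.map (fun q => q.1.1))
  · have hc : (pvLikeDict Q).contains o = true := by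
      rw [pvLike_contains]; exact decide_eq_true ho
    show ((pvLikeDict Q).setdefault o PySem.Dict.empty).insert o _ = _
    rw [PySem.Dict.setdefault_of_contains _ _ hc, pvLike_getD Q o ho]
    have htc : (PySem.Dict.mk (pvRow Q o)).contains t = false := by
      rw [PySem.Dict.contains_eq_decide_mem_keys, decide_eq_false_iff_not, PySem.Dict.keys_mk]
      intro htmem
      rcases List.mem_map.mp htmem with ⟨p, hp1, hp2⟩
      rcases List.mem_map.mp (by unfold pvRow at hp1; exact hp1) with ⟨q, hq1, hq2⟩
      have hqQ := List.mem_filter.mp hq1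
      have h11 : q.1.1 = o := by simpa using hqQ.2
      have h12 : q.1.2 = t := by rw [← hp2, ← hq2]
      apply hfresh
      refine List.mem_map.mpr ⟨q, hqQ.1, ?_⟩
      rw [show q.1 = (q.1.1, q.1.2) from rfl, h11, h12]
    have hins : (PySem.Dict.mk (pvRow Q o)).insert t c =
        PySem.Dict.mk (pvRow (Q ++ [((o, t), c)]) o) := by
      apply PySem.Dict.ext
      rw [PySem.Dict.items_insert_of_not_contains _ _ htc]
      exact hrow_self
    rw [hins]
    apply PySem.Dict.ext
    rw [PySem.Dict.items_insert_of_contains _ _ hc]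
    show List.map _ (pvLikeDict Q).items = (pvLikeDict (Q ++ [((o, t), c)])).items
    unfold pvLikeDict
    rw [hS', PySem.Set.add_of_mem ho]
    show List.map _ (List.map _ _) = _
    rw [List.map_map]
    apply List.map_congr_left
    intro o' _
    by_cases hne : o' = o
    · subst hne; simp
    · simp only [Function.comp_apply]
      rw [if_neg (by simpa using hne)]
      rw [pvRow_append_ne Q o t c o' hne]
  · have hc : (pvLikeDict Q).contains o = false := by
      rw [pvLike_contains]; exact decide_eq_false ho
    show ((pvLikeDict Q).setdefault o PySem.Dict.empty).insert o _ = _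
    rw [PySem.Dict.setdefault_of_not_contains _ _ hc]
    simp only [PySem.Dict.getD_insert_self, PySem.Dict.insert_insert_self]
    have hfe : Q.filter (fun q => q.1.1 == o) = [] := by
      rw [List.filter_eq_nil_iff]
      intro q hq hbeq
      exact ho ((PySem.Set.mem_ofList _ _).mpr (List.mem_map.mpr ⟨q, hq, by simpa using hbeq⟩))
    have hrow0 : pvRow Q o = [] := by unfold pvRow; rw [hfe]; rfl
    have hins : PySem.Dict.empty.insert t c = PySem.Dict.mk (pvRow (Q ++ [((o, t), c)]) o) := by
      apply PySem.Dict.ext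
      rw [PySem.Dict.items_insert_of_not_contains _ _ (by simp), ← hrow_self, hrow0]
      rfl
    rw [hins]
    apply PySem.Dict.ext
    rw [PySem.Dict.items_insert_of_not_contains _ _ hc]
    show (pvLikeDict Q).items ++ _ = (pvLikeDict (Q ++ [((o, t), c)])).items
    unfold pvLikeDict
    rw [hS', PySem.Set.add_of_not_mem ho, List.map_append, List.map_singleton]
    congr 1
    apply List.map_congr_left
    intro o' ho'
    have hne : o' ≠ o := fun h => ho (h ▸ ho')
    rw [pvRow_append_ne Q o t c o' hne]

theorem pvFoldB (Q : List ((String × String) × Int)) (hnd : (Q.map (fun q => q.1)).Nodup) :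
    Q.foldl
      (fun m q =>
        let m1 := m.setdefault q.1.1 PySem.Dict.empty
        m1.insert q.1.1 ((m1.getD q.1.1 PySem.Dict.empty).insert q.1.2 q.2))
      PySem.Dict.empty = pvLikeDict Q := by
  induction Q using List.reverseRecOn with
  | nil => rfl
  | append_singleton Q q ih =>
    rw [List.map_append] at hnd
    have hnd' := (List.nodup_append.mp hnd)
    rw [List.foldl_append, List.foldl_cons, List.foldl_nil, ih hnd'.1]
    have hfresh : (q.1.1, q.1.2) ∉ Q.map (fun q => q.1) := by
      intro hmem
      exact hnd'.2.2 q.1 hmem q.1 (List.mem_map.mpr ⟨q, List.mem_singleton_self q, rfl⟩) rfl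
    exact pvStepB Q q.1.1 q.1.2 q.2 hfresh

theorem pvRow_counter (P : List (String × String)) (o : String) :
    pvRow (PySem.Dict.counter P).items o = pvInner P o := by
  unfold pvRow pvInner
  rw [PySem.Dict.items_counter, List.filter_map, List.map_map]
  simp only [Function.comp_def]
  rw [pvSet_filter_ofList P (fun k => k.1 == o)]
  have hinj : ∀ a ∈ P.filter (fun q => q.1 == o), ∀ b ∈ P.filter (fun q => q.1 == o),
      Prod.snd a = Prod.snd b → a = b := by
    intro a ha b hb hab
    have ha1 : a.1 = o := by simpa using (List.mem_filter.mp ha).2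
    have hb1 : b.1 = o := by simpa using (List.mem_filter.mp hb).2
    exact Prod.ext (ha1.trans hb1.symm) hab
  rw [← pvSet_map_ofList_inj (P.filter (fun q => q.1 == o)) Prod.snd hinj, List.map_map]
  apply List.map_congr_left
  intro k hk
  have hk1 : k.1 = o := by
    simpa using (List.mem_filter.mp ((PySem.Set.mem_ofList _ _).mp hk)).2
  simp only [Function.comp_def]
  have hko : k = (o, k.2) := by rw [← hk1]
  rw [← hko]

theorem pvAssemble (P : List (String × String)) :
    pvLikeDict (PySem.Dict.counter P).items = pvSpecDict P := by
  unfold pvLikeDict pvSpecDict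
  apply PySem.Dict.ext
  show List.map _ _ = List.map _ _
  have houter : PySem.Set.ofList ((PySem.Dict.counter P).items.map (fun q => q.1.1)) =
      PySem.Set.ofList (P.map Prod.fst) := by
    rw [PySem.Dict.items_counter, List.map_map]
    exact pvSet_ofList_map P Prod.fst
  rw [houter]
  apply List.map_congr_left
  intro o _
  rw [pvRow_counter]

theorem pv_final (rrs : List (List (String × String))) :
    build_branch_reroute_matrix rrs = build_branch_reroute_matrix_alt rrs := by
  unfold build_branch_reroute_matrix build_branch_reroute_matrix_alt
  have hA : rrs.foldl
      (fun matrix r => pvInc matrix (pvGet r "original_branch") (pvGet r "reroute_candidate_branch"))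
      PySem.Dict.empty =
      pvSpecDict (rrs.map (fun r => (pvGet r "original_branch", pvGet r "reroute_candidate_branch"))) := by
    have h := List.foldl_map
      (f := fun r => (pvGet r "original_branch", pvGet r "reroute_candidate_branch"))
      (g := fun (m : PySem.Dict String (PySem.Dict String Int)) p => pvInc m p.1 p.2)
      (l := rrs) (init := PySem.Dict.empty)
    exact h.symm.trans (pvFoldA _)
  rw [hA]
  simp only [PySem.Dict.foldl_insert_getD_add_one_eq_counter]
  rw [pvFoldB _ (PySem.Dict.nodup_keys_counter _), pvAssemble]

-- ===== VERDICT (by name: the statement is the Claim_ definition above) =====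
theorem build_branch_reroute_matrix_spec : Claim_equal_build_branch_reroute_matrix := by
  intro rrs _
  unfold Spec_build_branch_reroute_matrix
  exact pv_final rrs
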